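-- pv_equiv track=rewrite | github.com/DRunING/ToMaTo | backend/tomato/generic.py | add_encoded_resources
-- ===== SOURCE A (Python) =====
-- def add_encoded_resources(r1, r2):
-- 	res = {}
-- 	for k, v in r1.items():
-- 		if k in res:
-- 			res[k] = str(int(res[k]) + int(v))
-- 		else:
-- 			res[k] = v
-- 	for k, v in r2.items():
-- 		if k in res:
-- 			res[k] = str(int(res[k]) + int(v))
-- 		else:
-- 			res[k] = v
-- 	return res
-- ===== SOURCE B (Python) =====
-- def add_encoded_resources(r1, r2):
-- 	res = dict(r1)
-- 	res.update(r2)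
-- 	for k in set(r1) & set(r2):
-- 		res[k] = str(int(r1[k]) + int(r2[k]))
-- 	return res
-- ===== Notes on version B (the rewrite author's own statement) =====
-- stated objective: alternative
-- what changed: Replaces A's two per-item branching accumulator passes with a blunt copy-then-overwrite merge (dict(r1) + update(r2)) followed by a separate fix-up pass that rewrites only the precomputed intersection keys set(r1) & set(r2) with the summed value.
import Mathlib
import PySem

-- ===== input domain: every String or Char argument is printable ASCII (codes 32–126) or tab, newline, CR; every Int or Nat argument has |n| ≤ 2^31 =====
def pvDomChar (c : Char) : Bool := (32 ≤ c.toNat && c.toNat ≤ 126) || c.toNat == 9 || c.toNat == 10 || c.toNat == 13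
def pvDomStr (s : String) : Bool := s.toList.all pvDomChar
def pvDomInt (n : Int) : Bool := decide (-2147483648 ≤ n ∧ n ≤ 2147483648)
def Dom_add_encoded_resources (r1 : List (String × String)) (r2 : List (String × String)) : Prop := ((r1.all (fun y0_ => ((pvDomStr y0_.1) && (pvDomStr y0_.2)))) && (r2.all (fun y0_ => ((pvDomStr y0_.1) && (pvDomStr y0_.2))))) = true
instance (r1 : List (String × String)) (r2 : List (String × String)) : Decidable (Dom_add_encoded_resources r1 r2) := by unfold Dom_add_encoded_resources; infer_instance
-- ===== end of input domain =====

-- B builds the merged dict bluntly (copy r1, overwrite with all of r2) and then, in a separate pass,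
-- patches only the intersection keys with the summed value — instead of A's two per-item branching
-- accumulator passes; same return value on Pre_.

-- str(int(a) + int(b)); the '.getD 0' is unreachable under Pre_, where both strings parse
def pvSum (a b : String) : String :=
  PySem.Int.toStr ((PySem.Int.ofStr? a).getD 0 + (PySem.Int.ofStr? b).getD 0)

-- ===== PORT A =====
-- one loop body of A: 'if k in res: res[k] = str(int(res[k]) + int(v)) else: res[k] = v'
def aStep (res : PySem.Dict String String) (kv : String × String) : PySem.Dict String String :=
  match res.get? kv.1 with
  | some w => res.insert kv.1 (pvSum w kv.2)
  | none   => res.insert kv.1 kv.2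

def add_encoded_resources (r1 : List (String × String)) (r2 : List (String × String)) : List (String × String) :=
  (r2.foldl aStep (r1.foldl aStep PySem.Dict.empty)).items

-- ===== PORT B =====
-- 'res[k] = str(int(r1[k]) + int(r2[k]))' for one intersection key k; the '.getD ""' defaults are
-- unreachable (k is in both dicts by construction)
def bPatch (d1 d2 : PySem.Dict String String) (res : PySem.Dict String String) (k : String) : PySem.Dict String String :=
  res.insert k (pvSum ((d1.get? k).getD "") ((d2.get? k).getD ""))

def add_encoded_resources_alt (r1 : List (String × String)) (r2 : List (String × String)) : List (String × String) :=
  let d1 := PySem.Dict.mk r1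
  let d2 := PySem.Dict.mk r2
  -- res = dict(r1); res.update(r2)
  let res := r2.foldl (fun d kv => d.insert kv.1 kv.2) d1
  -- for k in set(r1) & set(r2): … — every patch overwrites in place, so the result does not depend
  -- on the (unmodelled) Python set iteration order; we enumerate in r1 order
  let ks := PySem.Set.inter (PySem.Set.ofList (r1.map Prod.fst)) (PySem.Set.ofList (r2.map Prod.fst))
  (ks.foldl (bPatch d1 d2) res).items

-- ===== PRECONDITION & SPEC =====
-- Pre_ holds exactly on dict-like inputs where the Python A returns: the association lists have
-- unique keys (the Python arguments are dicts, which cannot carry duplicate keys), and on every key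
-- present in both dicts the two values parse as int — otherwise A raises ValueError in its second loop.
def Pre_add_encoded_resources (r1 : List (String × String)) (r2 : List (String × String)) : Prop :=
  (r1.map Prod.fst).Nodup ∧ (r2.map Prod.fst).Nodup ∧
  ∀ kv ∈ r2, (match (PySem.Dict.mk r1).get? kv.1 with
              | some a => (PySem.Int.ofStr? a).isSome && (PySem.Int.ofStr? kv.2).isSome
              | none   => true) = true
instance (r1 : List (String × String)) (r2 : List (String × String)) : Decidable (Pre_add_encoded_resources r1 r2) := by unfold Pre_add_encoded_resources; infer_instance

def pvWitness_add_encoded_resources : (List (String × String)) × (List (String × String)) :=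
  ([("cpus", "2"), ("memory", "007")], [("cpus", " +3 "), ("disk", "x")])

def Spec_add_encoded_resources (r1 : List (String × String)) (r2 : List (String × String)) (out : List (String × String)) : Prop := out = add_encoded_resources_alt r1 r2
instance (r1 : List (String × String)) (r2 : List (String × String)) (out : List (String × String)) : Decidable (Spec_add_encoded_resources r1 r2 out) := by unfold Spec_add_encoded_resources; infer_instance

-- ===== CLAIM (what is proved, stated in full; the proofs are below) =====
def Claim_equal_add_encoded_resources : Prop := ∀ (r1 : List (String × String)) (r2 : List (String × String)), Dom_add_encoded_resources r1 r2 → Pre_add_encoded_resources r1 r2 → Spec_add_encoded_resources r1 r2 (add_encoded_resources r1 r2)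

-- ===== LEMMAS AND PROOFS =====

-- A's loop body, generalised over the combining function f (A uses f = pvSum; with f = 'keep the
-- new value' it is also dict.update's body, since both branches then insert kv.2)
def gStep (f : String → String → String) (res : PySem.Dict String String) (kv : String × String) : PySem.Dict String String :=
  match res.get? kv.1 with
  | some w => res.insert kv.1 (f w kv.2)
  | none   => res.insert kv.1 kv.2

-- the per-item effect of folding gStep f over l, seen from an existing item of the accumulator
def gVal (f : String → String → String) (d2 : PySem.Dict String String) (kv : String × String) : String × String :=
  match d2.get? kv.1 with
  | some b => (kv.1, f kv.2 b)
  | none   => kv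

theorem aStep_eq_gStep : aStep = gStep pvSum := rfl

theorem insStep_eq_gStep (d : PySem.Dict String String) (kv : String × String) :
    d.insert kv.1 kv.2 = gStep (fun _ v => v) d kv := by
  unfold gStep; cases d.get? kv.1 <;> rfl

-- Core invariant: folding gStep f over a duplicate-free list l, starting from a duplicate-free
-- accumulator, merges l against the accumulator's items and appends l's fresh keys.
theorem foldl_gStep_items (f : String → String → String) (l : List (String × String))
    (acc : PySem.Dict String String)
    (hacc : acc.keys.Nodup) (hl : (l.map Prod.fst).Nodup) :
    (l.foldl (gStep f) acc).items =
      acc.items.map (gVal f (PySem.Dict.mk l))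
        ++ l.filter (fun kv => !(acc.contains kv.1)) := by
  induction l generalizing acc with
  | nil =>
    have hid : ∀ p : String × String, gVal f (PySem.Dict.mk []) p = p := by
      intro p
      have : (PySem.Dict.mk ([] : List (String × String))).get? p.1 = none := by
        rw [PySem.Dict.get?_eq_none_iff_not_mem_keys]; simp [PySem.Dict.keys_mk]
      simp [gVal, this]
    simp [List.map_congr_left fun p _ => hid p]
  | cons kv t ih =>
    obtain ⟨k, b⟩ := kv
    simp only [List.map_cons, List.nodup_cons] at hl
    obtain ⟨hkt, hlt⟩ := hl
    simp only [List.foldl_cons]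
    show (t.foldl (gStep f) (gStep f acc (k, b))).items = _
    have hmkcons : ∀ x, (PySem.Dict.mk ((k, b) :: t)).get? x =
        if k == x then some b else (PySem.Dict.mk t).get? x :=
      fun x => PySem.Dict.get?_mk_cons k b t x
    have hmkt_k : (PySem.Dict.mk t).get? k = none := by
      rw [PySem.Dict.get?_eq_none_iff_not_mem_keys]
      simpa using hkt
    cases hget : acc.get? k with
    | some w =>
      have hc : acc.contains k = true := by
        rw [PySem.Dict.contains_eq_isSome_get?, hget]; rfl
      have hstep : gStep f acc (k, b) = acc.insert k (f w b) := by
        simp [gStep, hget]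
      rw [hstep, ih _ (by simpa [PySem.Dict.keys_insert_of_contains acc _ hc] using hacc) hlt]
      rw [PySem.Dict.items_insert_of_contains acc _ hc, List.map_map]
      congr 1
      · apply List.map_congr_left
        intro p hp
        by_cases hpk : p.1 = k
        · have h2 : acc.get? p.1 = some p.2 := PySem.Dict.get?_of_mem_items acc hp hacc
          rw [hpk, hget] at h2
          have hpe : p = (k, w) := Prod.ext_iff.mpr ⟨hpk, (Option.some.inj h2).symm⟩
          simp only [Function.comp_apply, beq_self_eq_true, if_true, hpe]
          simp [gVal, PySem.Dict.get?_mk_cons, hmkt_k]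
        · have hbeq : (p.1 == k) = false := beq_eq_false_iff_ne.mpr hpk
          simp only [Function.comp_apply, hbeq, if_neg, Bool.false_eq_true, not_false_iff]
          simp [gVal, hmkcons, beq_eq_false_iff_ne.mpr (Ne.symm hpk)]
      · simp only [List.filter_cons, hc, Bool.not_true, Bool.false_eq_true, ite_false]
        apply List.filter_congr
        intro q hq
        have hqk : q.1 ≠ k := fun h => hkt (h ▸ List.mem_map_of_mem hq)
        simp [PySem.Dict.contains_insert, beq_eq_false_iff_ne.mpr hqk]
    | none =>
      have hc : acc.contains k = false := by
        rw [PySem.Dict.contains_eq_isSome_get?, hget]; rfl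
      have hstep : gStep f acc (k, b) = acc.insert k b := by
        simp [gStep, hget]
      have hknotin : k ∉ acc.keys := by
        rw [← PySem.Dict.get?_eq_none_iff_not_mem_keys]; exact hget
      rw [hstep, ih _ (PySem.Dict.nodup_keys_insert _ _ _ hacc) hlt]
      rw [PySem.Dict.items_insert_of_not_contains acc _ hc]
      rw [List.map_append]
      have hb : gVal f (PySem.Dict.mk t) (k, b) = (k, b) := by
        simp [gVal, hmkt_k]
      rw [List.append_assoc]
      congr 1
      · apply List.map_congr_left
        intro p hp
        have hpk : p.1 ≠ k := fun h => hknotin (h ▸ PySem.Dict.mem_keys_of_mem_items acc hp)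
        simp [gVal, hmkcons, beq_eq_false_iff_ne.mpr (Ne.symm hpk)]
      · simp only [List.map_cons, List.map_nil, hb, List.filter_cons, hc, Bool.not_false,
          List.singleton_append, ite_true]
        congr 1
        apply List.filter_congr
        intro q hq
        have hqk : q.1 ≠ k := fun h => hkt (h ▸ List.mem_map_of_mem hq)
        simp [PySem.Dict.contains_insert, beq_eq_false_iff_ne.mpr hqk]

-- B's patch pass: overwriting each key of a duplicate-free list K (all already present) rewrites
-- exactly the items whose key lies in K, in place.
theorem foldl_patch_items (w : String → String) (K : List String)
    (res : PySem.Dict String String) (hres : res.keys.Nodup) (hK : K.Nodup)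
    (hmem : ∀ k ∈ K, res.contains k = true) :
    (K.foldl (fun r k => r.insert k (w k)) res).items =
      res.items.map (fun p => if p.1 ∈ K then (p.1, w p.1) else p) := by
  induction K generalizing res with
  | nil => simp
  | cons k K ih =>
    simp only [List.nodup_cons] at hK
    obtain ⟨hkK, hKnd⟩ := hK
    have hck : res.contains k = true := hmem k (List.mem_cons_self ..)
    simp only [List.foldl_cons]
    rw [ih (res.insert k (w k))
        (by simpa [PySem.Dict.keys_insert_of_contains res _ hck] using hres) hKnd
        (by intro q hq
            rw [PySem.Dict.contains_insert]
            simp [hmem q (List.mem_cons_of_mem _ hq)])]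
    rw [PySem.Dict.items_insert_of_contains res _ hck, List.map_map]
    apply List.map_congr_left
    intro p _
    by_cases hpk : p.1 = k
    · have hbeq : (p.1 == k) = true := beq_iff_eq.mpr hpk
      simp only [Function.comp_apply, hbeq, if_true]
      simp [hkK, hpk]
    · have hbeq : (p.1 == k) = false := beq_eq_false_iff_ne.mpr hpk
      simp only [Function.comp_apply, hbeq, Bool.false_eq_true, if_neg, not_false_iff]
      by_cases hpK : p.1 ∈ K <;> simp [hpK, hpk]

-- ===== VERDICT (by name: the statement is the Claim_ definition above) =====
theorem add_encoded_resources_spec : Claim_equal_add_encoded_resources := by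
  intro r1 r2 _ hpre
  obtain ⟨h1, h2, -⟩ := hpre
  unfold Spec_add_encoded_resources add_encoded_resources add_encoded_resources_alt
  rw [aStep_eq_gStep]
  have hd1nd : (PySem.Dict.mk r1).keys.Nodup := by simpa [PySem.Dict.keys_mk] using h1
  -- A's side: the first loop reproduces r1, the second merges r2 into it
  have hfold1 : r1.foldl (gStep pvSum) PySem.Dict.empty = PySem.Dict.mk r1 := by
    apply PySem.Dict.ext
    rw [foldl_gStep_items pvSum r1 PySem.Dict.empty (by simp) h1]
    simp [PySem.Dict.empty]
  rw [hfold1, foldl_gStep_items pvSum r2 (PySem.Dict.mk r1) hd1nd h2]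
  -- B's side: dict.update's body is gStep with 'keep the new value'
  have hstep_eq : (fun (d : PySem.Dict String String) (kv : String × String) => d.insert kv.1 kv.2)
      = gStep (fun _ v => v) := funext fun d => funext fun kv => insStep_eq_gStep d kv
  rw [hstep_eq]
  set K := PySem.Set.inter (PySem.Set.ofList (r1.map Prod.fst)) (PySem.Set.ofList (r2.map Prod.fst))
    with hKdef
  set w := fun k => pvSum (((PySem.Dict.mk r1).get? k).getD "") (((PySem.Dict.mk r2).get? k).getD "")
    with hwdef
  have hmemK : ∀ k, k ∈ K ↔ k ∈ r1.map Prod.fst ∧ k ∈ r2.map Prod.fst := by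
    intro k
    rw [hKdef, PySem.Set.mem_inter]
    simp [PySem.Set.mem_ofList]
  have hKnd : K.Nodup := PySem.Set.nodup_inter _ _ (PySem.Set.nodup_ofList _)
  have hresnd : (r2.foldl (gStep fun _ v => v) (PySem.Dict.mk r1)).keys.Nodup := by
    rw [← hstep_eq]
    exact PySem.Dict.nodup_keys_foldl_insert_key r2 Prod.fst (fun _ kv => kv.2) _ hd1nd
  have hcont : ∀ k ∈ K, (r2.foldl (gStep fun _ v => v) (PySem.Dict.mk r1)).contains k = true := by
    intro k hk
    rw [← hstep_eq, PySem.Dict.contains_iff_mem_keys,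
        PySem.Dict.keys_foldl_insert_key r2 Prod.fst (fun _ kv => kv.2)]
    rw [PySem.Set.mem_update]
    have hk1 : k ∈ r1.map Prod.fst := ((hmemK k).mp hk).1
    exact Or.inl (by simpa [PySem.Dict.keys_mk, PySem.Set.mem_ofList] using hk1)
  rw [show (K.foldl (bPatch (PySem.Dict.mk r1) (PySem.Dict.mk r2))
          (r2.foldl (gStep fun _ v => v) (PySem.Dict.mk r1))).items
        = (r2.foldl (gStep fun _ v => v) (PySem.Dict.mk r1)).items.map
            (fun p => if p.1 ∈ K then (p.1, w p.1) else p) from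
      foldl_patch_items w K _ hresnd hKnd hcont]
  rw [foldl_gStep_items (fun _ v => v) r2 (PySem.Dict.mk r1) hd1nd h2]
  rw [List.map_append]
  congr 1
  · -- the r1-derived items: the patch turns the overwritten value into the sum
    rw [List.map_map]
    apply List.map_congr_left
    intro kv hkv
    have hd1get : (PySem.Dict.mk r1).get? kv.1 = some kv.2 :=
      PySem.Dict.get?_of_mem_items _ hkv hd1nd
    have hk1 : kv.1 ∈ r1.map Prod.fst := by
      have : kv.1 ∈ (PySem.Dict.mk r1).keys := PySem.Dict.mem_keys_of_mem_items _ hkv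
      simpa [PySem.Dict.keys_mk, PySem.Set.mem_ofList] using this
    cases hg : (PySem.Dict.mk r2).get? kv.1 with
    | some b =>
      have hk2 : kv.1 ∈ r2.map Prod.fst := by
        by_contra hn
        rw [(PySem.Dict.get?_eq_none_iff_not_mem_keys _ _).mpr
          (by simpa [PySem.Dict.keys_mk, PySem.Set.mem_ofList] using hn)] at hg
        cases hg
      have hkK : kv.1 ∈ K := (hmemK kv.1).mpr ⟨hk1, hk2⟩
      simp [Function.comp, gVal, hg, hkK, hd1get, hwdef]
    | none =>
      have hk2 : kv.1 ∉ r2.map Prod.fst := by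
        intro hn
        rw [PySem.Dict.get?_eq_none_iff_not_mem_keys] at hg
        exact hg (by simpa [PySem.Dict.keys_mk, PySem.Set.mem_ofList] using hn)
      have hkK : kv.1 ∉ K := fun h => hk2 ((hmemK kv.1).mp h).2
      simp [Function.comp, gVal, hg, hkK]
  · -- the r2-only items are untouched by the patch pass
    have hid : ∀ kv ∈ r2.filter (fun kv => !((PySem.Dict.mk r1).contains kv.1)),
        (fun p : String × String => if p.1 ∈ K then (p.1, w p.1) else p) kv = kv := by
      intro kv hkv
      rw [List.mem_filter] at hkv
      have hk1 : kv.1 ∉ r1.map Prod.fst := by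
        intro hn
        have : (PySem.Dict.mk r1).contains kv.1 = true := by
          rw [PySem.Dict.contains_iff_mem_keys]
          simpa [PySem.Dict.keys_mk, PySem.Set.mem_ofList] using hn
        rw [this] at hkv
        simp at hkv
      have hkK : kv.1 ∉ K := fun h => hk1 ((hmemK kv.1).mp h).1
      simp [hkK]
    simpa using (List.map_congr_left hid).symm
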